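-- pv_equiv track=rewrite | github.com/nachop51/notifications-dbus-arch | src/notification_window.py | _prepare_actions_data
-- ===== SOURCE A (Python) =====
-- def _prepare_actions_data(actions):
--     """Convert actions array to structured data for JavaScript."""
--     if not actions:
--         return []
--
--     action_buttons = []
--     # Actions come in pairs: action_key, action_label
--     for i in range(0, len(actions), 2):
--         if i + 1 < len(actions):
--             action_key = actions[i]
--             action_label = actions[i + 1]
--             action_buttons.append({"key": action_key, "label": action_label})
--
--     return action_buttons
-- ===== SOURCE B (Python) =====
-- def _prepare_actions_data(actions):
--     """Convert actions array to structured data for JavaScript."""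
--     if not actions:
--         return []
--     it = iter(actions)
--     return [{"key": k, "label": l} for k, l in zip(it, it)]
-- ===== Notes on version B (the rewrite author's own statement) =====
-- stated objective: idiomatic
-- what changed: Replaces the index loop with its range/step-2 arithmetic and bounds check by a single iterator zipped with itself, pairing adjacent elements directly (zip's truncation drops an unmatched trailing element).
import Mathlib
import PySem

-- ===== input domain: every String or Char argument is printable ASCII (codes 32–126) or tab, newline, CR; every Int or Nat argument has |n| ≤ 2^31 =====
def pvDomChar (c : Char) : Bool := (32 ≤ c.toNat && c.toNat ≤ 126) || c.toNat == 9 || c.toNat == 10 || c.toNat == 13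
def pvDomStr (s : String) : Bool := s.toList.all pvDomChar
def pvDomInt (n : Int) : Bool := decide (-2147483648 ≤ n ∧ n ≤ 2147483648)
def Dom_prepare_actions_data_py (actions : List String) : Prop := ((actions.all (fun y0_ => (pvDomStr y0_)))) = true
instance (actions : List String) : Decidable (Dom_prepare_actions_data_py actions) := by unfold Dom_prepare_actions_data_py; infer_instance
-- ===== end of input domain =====

-- B replaces A's index loop (range step 2 + bounds check) by direct structural pairing of
-- adjacent elements (iterator zipped with itself); same cost, more idiomatic.


-- ===== PORT A =====
-- literal port of A: `if not actions: return []`, then a for-loop over range(0, len, 2)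
-- appending {"key": actions[i], "label": actions[i+1]} when i+1 < len
def prepare_actions_data_py (actions : List String) : List (List (String × String)) :=
  if actions = [] then []
  else
    (PySem.List.pyRange 0 (actions.length : Int) 2).foldl
      (fun action_buttons i =>
        if i + 1 < (actions.length : Int) then
          action_buttons ++
            [[("key", PySem.List.pyGetD actions i ""),
              ("label", PySem.List.pyGetD actions (i + 1) "")]]
        else action_buttons) []

-- ===== PORT B =====
-- port of B: zip(it, it) pairs adjacent elements structurally, truncating an odd tail
def pairZip : List String → List (List (String × String))
  | k :: l :: rest => [("key", k), ("label", l)] :: pairZip rest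
  | _ => []

def prepare_actions_data_py_alt (actions : List String) : List (List (String × String)) :=
  if actions = [] then [] else pairZip actions

-- ===== PRECONDITION & SPEC =====
def Spec_prepare_actions_data_py (actions : List String) (out : List (List (String × String))) : Prop := out = prepare_actions_data_py_alt actions
instance (actions : List String) (out : List (List (String × String))) : Decidable (Spec_prepare_actions_data_py actions out) := by unfold Spec_prepare_actions_data_py; infer_instance

-- ===== CLAIM (what is proved, stated in full; the proofs are below) =====
def Claim_equal_prepare_actions_data_py : Prop := ∀ (actions : List String), Dom_prepare_actions_data_py actions → Spec_prepare_actions_data_py actions (prepare_actions_data_py actions)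

-- ===== LEMMAS AND PROOFS =====

theorem pyRange_two_cons (a b : ℤ) (h : a < b) :
    PySem.List.pyRange a b 2 = a :: PySem.List.pyRange (a + 2) b 2 := by
  rw [PySem.List.pyRange_of_pos a b (by norm_num), PySem.List.pyRange_of_pos (a+2) b (by norm_num)]
  have h1 : ((b - a + 2 - 1) / 2).toNat = ((b - (a+2) + 2 - 1) / 2).toNat + 1 := by omega
  simp only [if_pos h, h1]
  by_cases h2 : a + 2 < b
  · simp only [if_pos h2, List.range_succ_eq_map, List.map_cons, List.map_map]
    refine congrArg₂ _ (by push_cast; ring) ?_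
    apply List.map_congr_left
    intro k _
    simp only [Function.comp_apply]
    push_cast
    ring
  · simp only [if_neg h2]
    have h3 : ((b - (a+2) + 2 - 1) / 2).toNat = 0 := by omega
    simp [h3]

theorem pyRange_two_nil (a b : ℤ) (h : b ≤ a) : PySem.List.pyRange a b 2 = [] := by
  rw [PySem.List.pyRange_of_pos a b (by norm_num)]
  simp [show ¬ a < b by omega]

-- A's loop, indexing into pre ++ l from offset pre.length, produces exactly pairZip l
theorem loopA (l : List String) : ∀ (pre : List String) (acc : List (List (String × String))),
    (PySem.List.pyRange (pre.length : Int) ((pre.length : Int) + (l.length : Int)) 2).foldl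
      (fun ab i =>
        if i + 1 < ((pre.length : Int) + (l.length : Int)) then
          ab ++ [[("key", PySem.List.pyGetD (pre ++ l) i ""),
                  ("label", PySem.List.pyGetD (pre ++ l) (i + 1) "")]]
        else ab) acc = acc ++ pairZip l := by
  induction l using pairZip.induct with
  | case1 k lab rest ih =>
    intro pre acc
    have hcons : PySem.List.pyRange (pre.length : Int)
        ((pre.length : Int) + ((k :: lab :: rest).length : Int)) 2
        = (pre.length : Int) :: PySem.List.pyRange ((pre.length : Int) + 2)
            ((pre.length : Int) + ((k :: lab :: rest).length : Int)) 2 := by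
      apply pyRange_two_cons
      simp
      omega
    rw [hcons, List.foldl_cons]
    have hguard : ((pre.length : Int) + 1 < (pre.length : Int) + ((k :: lab :: rest).length : Int)) := by
      simp
    rw [if_pos hguard]
    have hk : PySem.List.pyGetD (pre ++ k :: lab :: rest) (pre.length : Int) "" = k := by
      rw [PySem.List.pyGetD_natCast]
      simp [List.getD_eq_getElem?_getD]
    have hlab : PySem.List.pyGetD (pre ++ k :: lab :: rest) ((pre.length : Int) + 1) "" = lab := by
      have : ((pre.length : Int) + 1) = ((pre.length + 1 : Nat) : Int) := by push_cast; ring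
      rw [this, PySem.List.pyGetD_natCast]
      simp [List.getD_eq_getElem?_getD]
    rw [hk, hlab]
    have := ih (pre ++ [k, lab]) (acc ++ [[("key", k), ("label", lab)]])
    have hlen : ((pre ++ [k, lab]).length : Int) = (pre.length : Int) + 2 := by simp
    have happ : (pre ++ [k, lab]) ++ rest = pre ++ k :: lab :: rest := by simp
    have hlen2 : ((pre.length : Int) + 2) + (rest.length : Int)
        = (pre.length : Int) + ((k :: lab :: rest).length : Int) := by simp; ring
    rw [hlen, happ, hlen2] at this
    rw [this]
    simp [pairZip]
  | case2 l h1 =>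
    -- l is [] or a singleton: pairZip l = []
    intro pre acc
    match l, h1 with
    | [], _ =>
      rw [pyRange_two_nil _ _ (by simp)]
      simp [pairZip]
    | a :: b :: rest, h1 => exact absurd rfl (h1 a b rest)
    | [x], _ =>
      have hcons : PySem.List.pyRange (pre.length : Int)
          ((pre.length : Int) + (([x] : List String).length : Int)) 2
          = (pre.length : Int) :: PySem.List.pyRange ((pre.length : Int) + 2)
              ((pre.length : Int) + (([x] : List String).length : Int)) 2 := by
        apply pyRange_two_cons; simp
      rw [hcons, List.foldl_cons]
      rw [if_neg (by simp)]
      rw [pyRange_two_nil _ _ (by simp)]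
      simp [pairZip]

-- ===== VERDICT (by name: the statement is the Claim_ definition above) =====
theorem prepare_actions_data_py_spec : Claim_equal_prepare_actions_data_py := by
  intro actions _
  unfold Spec_prepare_actions_data_py prepare_actions_data_py prepare_actions_data_py_alt
  by_cases h : actions = []
  · simp [h]
  · rw [if_neg h, if_neg h]
    have := loopA actions [] []
    simpa using this
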